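-- pv_equiv track=rewrite | github.com/MalaRam06/AI-Labwork | Ai_assignment4/scheduler.py | compute_downstream
-- ===== SOURCE A (Python) =====
-- from collections import defaultdict, deque, Counter
--
-- def compute_downstream(assignments,dep):
--     rev=defaultdict(set)
--     for a,ps in dep.items():
--         for p in ps: rev[p].add(a)
--     r={}
--     for s in assignments:
--         vis,stk=set(),[s]
--         while stk:
--             n=stk.pop()
--             for c in rev[n]:
--                 if c not in vis: vis.add(c); stk.append(c)
--         r[s]=len(vis)
--     return r
-- ===== SOURCE B (Python) =====
-- from collections import defaultdict
--
-- def compute_downstream(assignments, dep):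
--     # Round-based saturation instead of per-source stack DFS: vis starts at the
--     # direct reverse-dependents of s and is expanded one edge per round; len(dep)
--     # rounds are enough since a shortest reverse-path visits distinct dep keys.
--     rev = defaultdict(set)
--     for a, ps in dep.items():
--         for p in ps:
--             rev[p].add(a)
--     r = {}
--     for s in assignments:
--         vis = set(rev[s])
--         for _ in range(len(dep)):
--             nxt = set(vis)
--             for n in vis:
--                 nxt |= rev[n]
--             vis = nxt
--         r[s] = len(vis)
--     return r
-- ===== Notes on version B (the rewrite author's own statement) =====
-- stated objective: alternative
-- what changed: Replaces A's per-source explicit-stack DFS over the reverse graph with a round-based saturation (BFS-style fixpoint): vis starts at the direct reverse-dependents of the source and is expanded by one edge per round for len(dep) rounds, which suffices because a shortest reverse-path visits distinct dep keys.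
import Mathlib
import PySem

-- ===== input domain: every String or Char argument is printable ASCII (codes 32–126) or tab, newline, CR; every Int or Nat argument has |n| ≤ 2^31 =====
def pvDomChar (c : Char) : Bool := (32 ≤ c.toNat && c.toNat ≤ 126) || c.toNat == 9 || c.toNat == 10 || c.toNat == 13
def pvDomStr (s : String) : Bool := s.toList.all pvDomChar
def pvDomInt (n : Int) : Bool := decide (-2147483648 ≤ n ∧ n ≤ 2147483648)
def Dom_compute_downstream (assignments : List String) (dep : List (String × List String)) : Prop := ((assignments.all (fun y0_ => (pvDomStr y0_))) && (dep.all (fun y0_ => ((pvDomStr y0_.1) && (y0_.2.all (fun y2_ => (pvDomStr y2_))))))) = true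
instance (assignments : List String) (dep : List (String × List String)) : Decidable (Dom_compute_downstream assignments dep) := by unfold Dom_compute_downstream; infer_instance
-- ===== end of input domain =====

-- B replaces A's per-source explicit-stack DFS with a round-based saturation of the
-- reachable set (one edge per round, len(dep) rounds): an alternative algorithm of
-- similar cost, proved to return the same dict.

-- ===== PORT A =====
-- shared helper: both Pythons build `rev` with the same two loops
-- (rev = defaultdict(set); for a, ps in dep.items(): for p in ps: rev[p].add(a))
def pvBuildRev (dep : List (String × List String)) : PySem.Dict String (PySem.Set String) :=
  dep.foldl
    (fun rev aps =>
      aps.2.foldl (fun r p => PySem.Dict.modify r p PySem.Set.empty (fun s => PySem.Set.add s aps.1)) rev)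
    PySem.Dict.empty

-- A's `while stk:` loop; fuel (dep.length + 1) bounds the number of iterations (each
-- iteration pops one entry and every push marks a fresh dep key visited) — proved in
-- pvDfsLoop_mem below.  The Lean stack holds Python's end-of-list stack reversed
-- (push = cons, pop = head); `rev[n]` on the defaultdict is `getD n ∅` (the inserted
-- default never affects the result); the popped node's neighbour set is consumed in the
-- Set's insertion order — the visited SET built from it (hence its size) is order-independent.
def pvDfsLoop (rev : PySem.Dict String (PySem.Set String)) :
    Nat → PySem.Set String → List String → PySem.Set String
  | 0, vis, _ => vis
  | _ + 1, vis, [] => vis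
  | f + 1, vis, n :: stk =>
    let st := (PySem.Dict.getD rev n PySem.Set.empty).foldl
      (fun (st : PySem.Set String × List String) c =>
        if c ∈ st.1 then st else (PySem.Set.add st.1 c, c :: st.2))
      (vis, stk)
    pvDfsLoop rev f st.1 st.2

def compute_downstream (assignments : List String) (dep : List (String × List String)) : List (String × Int) :=
  let rev := pvBuildRev dep
  (assignments.foldl
    (fun (r : PySem.Dict String Int) s =>
      PySem.Dict.insert r s (PySem.Set.len (pvDfsLoop rev (dep.length + 1) PySem.Set.empty [s])))
    PySem.Dict.empty).items

-- ===== PORT B =====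
-- one saturation round: nxt = set(vis); for n in vis: nxt |= rev[n]
def pvSatRound (rev : PySem.Dict String (PySem.Set String)) (vis : PySem.Set String) : PySem.Set String :=
  List.foldl (fun nxt n => PySem.Set.update nxt (PySem.Dict.getD rev n PySem.Set.empty)) vis vis

-- for _ in range(len(dep)): vis = round(vis)
def pvSatLoop (rev : PySem.Dict String (PySem.Set String)) : Nat → PySem.Set String → PySem.Set String
  | 0, vis => vis
  | k + 1, vis => pvSatLoop rev k (pvSatRound rev vis)

def compute_downstream_alt (assignments : List String) (dep : List (String × List String)) : List (String × Int) :=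
  let rev := pvBuildRev dep
  (assignments.foldl
    (fun (r : PySem.Dict String Int) s =>
      PySem.Dict.insert r s (PySem.Set.len
        (pvSatLoop rev dep.length (PySem.Set.ofList (PySem.Dict.getD rev s PySem.Set.empty)))))
    PySem.Dict.empty).items

-- ===== PRECONDITION & SPEC =====
def Spec_compute_downstream (assignments : List String) (dep : List (String × List String)) (out : List (String × Int)) : Prop := out = compute_downstream_alt assignments dep
instance (assignments : List String) (dep : List (String × List String)) (out : List (String × Int)) : Decidable (Spec_compute_downstream assignments dep out) := by unfold Spec_compute_downstream; infer_instance

-- ===== CLAIM (what is proved, stated in full; the proofs are below) =====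
def Claim_equal_compute_downstream : Prop := ∀ (assignments : List String) (dep : List (String × List String)), Dom_compute_downstream assignments dep → Spec_compute_downstream assignments dep (compute_downstream assignments dep)

-- ===== LEMMAS AND PROOFS =====

-- the edge relation of the reverse graph
def pvE (rev : PySem.Dict String (PySem.Set String)) (x y : String) : Prop :=
  y ∈ PySem.Dict.getD rev x PySem.Set.empty

-- "x is reachable from s by a path of 1 .. k edges"
def pvRW (rev : PySem.Dict String (PySem.Set String)) : Nat → String → String → Prop
  | 0 => fun _ _ => False
  | k + 1 => fun s x => pvE rev s x ∨ ∃ m, pvRW rev k s m ∧ pvE rev m x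

theorem pv_inner (a : String) (ks : List String) (ha : a ∈ ks) :
    ∀ (ps : List String) (d : PySem.Dict String (PySem.Set String)),
      (∀ x y, y ∈ PySem.Dict.getD d x PySem.Set.empty → y ∈ ks) →
      ∀ x y, y ∈ PySem.Dict.getD (ps.foldl (fun r p => PySem.Dict.modify r p PySem.Set.empty (fun s => PySem.Set.add s a)) d) x PySem.Set.empty → y ∈ ks := by
  intro ps
  induction ps with
  | nil => intro d hd; exact hd
  | cons p ps ih =>
    intro d hd
    refine ih _ ?_
    intro x y hy
    rw [PySem.Dict.getD_modify] at hy
    by_cases hx : x = p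
    · simp only [hx] at hy
      rcases (PySem.Set.mem_add _ _ _).mp hy with h | h
      · exact hd _ _ h
      · exact h ▸ ha
    · simp only [if_neg hx] at hy
      exact hd _ _ hy

theorem pvBuildRev_target (dep : List (String × List String)) (x y : String)
    (h : pvE (pvBuildRev dep) x y) : y ∈ dep.map Prod.fst := by
  have outer : ∀ (l : List (String × List String)) (d : PySem.Dict String (PySem.Set String)),
      (∀ aps ∈ l, aps.1 ∈ dep.map Prod.fst) →
      (∀ x y, y ∈ PySem.Dict.getD d x PySem.Set.empty → y ∈ dep.map Prod.fst) →
      ∀ x y, y ∈ PySem.Dict.getD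
        (l.foldl (fun rev aps =>
          aps.2.foldl (fun r p => PySem.Dict.modify r p PySem.Set.empty (fun s => PySem.Set.add s aps.1)) rev) d)
        x PySem.Set.empty → y ∈ dep.map Prod.fst := by
    intro l
    induction l with
    | nil => intro d _ hd; exact hd
    | cons aps l ih =>
      intro d hl hd
      refine ih _ (fun q hq => hl q (List.mem_cons_of_mem _ hq)) ?_
      exact pv_inner aps.1 _ (hl aps (List.mem_cons_self)) aps.2 d hd
  refine outer dep PySem.Dict.empty (fun q hq => List.mem_map_of_mem hq) ?_ x y h
  intro x y hy
  rw [PySem.Dict.getD_empty] at hy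
  exact absurd hy (List.not_mem_nil)

theorem pvRW_mono (rev : PySem.Dict String (PySem.Set String)) (k : Nat) (s : String) :
    ∀ x, pvRW rev k s x → pvRW rev (k + 1) s x := by
  induction k with
  | zero => intro x h; exact absurd h (by simp [pvRW])
  | succ k ih =>
    intro x h
    rcases h with h | ⟨m, hm, he⟩
    · exact Or.inl h
    · exact Or.inr ⟨m, ih m hm, he⟩

theorem pvRW_le (rev : PySem.Dict String (PySem.Set String)) {j k : Nat} (h : j ≤ k) (s x : String)
    (hr : pvRW rev j s x) : pvRW rev k s x := by
  induction h with
  | refl => exact hr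
  | step h ih => exact pvRW_mono rev _ s x ih
theorem pvRW_succ (rev : PySem.Dict String (PySem.Set String)) {k : Nat} (hk : 1 ≤ k) (s x : String) :
    pvRW rev (k + 1) s x ↔ pvRW rev k s x ∨ ∃ m, pvRW rev k s m ∧ pvE rev m x := by
  constructor
  · intro h
    rcases h with h | h
    · exact Or.inl (pvRW_le rev hk s x (Or.inl h))
    · exact Or.inr h
  · intro h
    rcases h with h | h
    · exact pvRW_mono rev k s x h
    · exact Or.inr h

theorem pvRW_to_tg (rev : PySem.Dict String (PySem.Set String)) (k : Nat) (s : String) :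
    ∀ x, pvRW rev k s x → Relation.TransGen (pvE rev) s x := by
  induction k with
  | zero => intro x h; exact absurd h (by simp [pvRW])
  | succ k ih =>
    intro x h
    rcases h with h | ⟨m, hm, he⟩
    · exact Relation.TransGen.single h
    · exact Relation.TransGen.tail (ih m hm) he

theorem pvSatRound_mem (rev : PySem.Dict String (PySem.Set String)) (vis : PySem.Set String) (x : String) :
    x ∈ pvSatRound rev vis ↔ x ∈ vis ∨ ∃ n ∈ vis, pvE rev n x := by
  have gen : ∀ (l acc : List String),
      x ∈ List.foldl (fun nxt n => PySem.Set.update nxt (PySem.Dict.getD rev n PySem.Set.empty)) acc l ↔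
        x ∈ acc ∨ ∃ n ∈ l, pvE rev n x := by
    intro l
    induction l with
    | nil => intro acc; simp
    | cons n t ih =>
      intro acc
      rw [List.foldl_cons, ih]
      rw [PySem.Set.mem_update]
      constructor
      · rintro (h | h) 
        · rcases h with h | h
          · exact Or.inl h
          · exact Or.inr ⟨n, List.mem_cons_self, h⟩
        · rcases h with ⟨m, hm, he⟩
          exact Or.inr ⟨m, List.mem_cons_of_mem _ hm, he⟩
      · rintro (h | ⟨m, hm, he⟩)
        · exact Or.inl (Or.inl h)
        · rcases List.mem_cons.mp hm with rfl | hm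
          · exact Or.inl (Or.inr he)
          · exact Or.inr ⟨m, hm, he⟩
  exact gen vis vis

theorem pvSatRound_nodup (rev : PySem.Dict String (PySem.Set String)) (vis : PySem.Set String)
    (h : vis.Nodup) : (pvSatRound rev vis).Nodup := by
  have gen : ∀ (l acc : List String), acc.Nodup →
      (List.foldl (fun nxt n => PySem.Set.update nxt (PySem.Dict.getD rev n PySem.Set.empty)) acc l).Nodup := by
    intro l
    induction l with
    | nil => intro acc h; exact h
    | cons n t ih => intro acc h; exact ih _ (PySem.Set.nodup_update _ _ h)
  exact gen vis vis h

theorem pvSatLoop_nodup (rev : PySem.Dict String (PySem.Set String)) (k : Nat) :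
    ∀ (vis : PySem.Set String), vis.Nodup → (pvSatLoop rev k vis).Nodup := by
  induction k with
  | zero => intro vis h; exact h
  | succ k ih => intro vis h; exact ih _ (pvSatRound_nodup rev vis h)

theorem pvSatLoop_mem (rev : PySem.Dict String (PySem.Set String)) (s : String) :
    ∀ (k j : Nat) (vis : PySem.Set String), 1 ≤ j →
      (∀ x, x ∈ vis ↔ pvRW rev j s x) →
      ∀ x, x ∈ pvSatLoop rev k vis ↔ pvRW rev (j + k) s x := by
  intro k
  induction k with
  | zero => intro j vis _ hvis x; exact hvis x
  | succ k ih =>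
    intro j vis hj hvis x
    have hnext : ∀ x, x ∈ pvSatRound rev vis ↔ pvRW rev (j + 1) s x := by
      intro x
      rw [pvSatRound_mem, pvRW_succ rev hj]
      constructor
      · rintro (h | ⟨n, hn, he⟩)
        · exact Or.inl ((hvis x).mp h)
        · exact Or.inr ⟨n, (hvis n).mp hn, he⟩
      · rintro (h | ⟨n, hn, he⟩)
        · exact Or.inl ((hvis x).mpr h)
        · exact Or.inr ⟨n, (hvis n).mpr hn, he⟩
    have := ih (j + 1) (pvSatRound rev vis) (by omega) hnext x
    rw [show pvSatLoop rev (k+1) vis = pvSatLoop rev k (pvSatRound rev vis) from rfl, this]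
    have : j + 1 + k = j + (k + 1) := by omega
    rw [this]


theorem pvExpand_mem1 : ∀ (cs : List String) (vis : PySem.Set String) (stk : List String) (x : String),
    x ∈ (cs.foldl (fun (st : PySem.Set String × List String) c =>
        if c ∈ st.1 then st else (PySem.Set.add st.1 c, c :: st.2)) (vis, stk)).1 ↔
      x ∈ vis ∨ x ∈ cs := by
  intro cs
  induction cs with
  | nil => simp
  | cons c t ih =>
    intro vis stk x
    simp only [List.foldl_cons]
    by_cases hc : c ∈ vis
    · simp only [hc, if_pos, ih]
      constructor
      · rintro (h | h)
        · exact Or.inl h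
        · exact Or.inr (List.mem_cons_of_mem _ h)
      · rintro (h | h)
        · exact Or.inl h
        · rcases List.mem_cons.mp h with rfl | h
          · exact Or.inl hc
          · exact Or.inr h
    · simp only [hc, if_false, ih]
      rw [PySem.Set.mem_add]
      constructor
      · rintro ((h | rfl) | h)
        · exact Or.inl h
        · exact Or.inr List.mem_cons_self
        · exact Or.inr (List.mem_cons_of_mem _ h)
      · rintro (h | h)
        · exact Or.inl (Or.inl h)
        · rcases List.mem_cons.mp h with rfl | h
          · exact Or.inl (Or.inr rfl)
          · exact Or.inr h

theorem pvExpand_mem2 : ∀ (cs : List String) (vis : PySem.Set String) (stk : List String) (x : String),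
    x ∈ (cs.foldl (fun (st : PySem.Set String × List String) c =>
        if c ∈ st.1 then st else (PySem.Set.add st.1 c, c :: st.2)) (vis, stk)).2 →
      x ∈ stk ∨ x ∈ cs := by
  intro cs
  induction cs with
  | nil => simp
  | cons c t ih =>
    intro vis stk x
    simp only [List.foldl_cons]
    by_cases hc : c ∈ vis
    · simp only [hc, if_pos]
      intro h
      rcases ih _ _ _ h with h | h
      · exact Or.inl h
      · exact Or.inr (List.mem_cons_of_mem _ h)
    · simp only [hc, if_false]
      intro h
      rcases ih _ _ _ h with h | h
      · rcases List.mem_cons.mp h with rfl | h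
        · exact Or.inr List.mem_cons_self
        · exact Or.inl h
      · exact Or.inr (List.mem_cons_of_mem _ h)

theorem pvExpand_stk_sub : ∀ (cs : List String) (vis : PySem.Set String) (stk : List String) (x : String),
    x ∈ stk →
    x ∈ (cs.foldl (fun (st : PySem.Set String × List String) c =>
        if c ∈ st.1 then st else (PySem.Set.add st.1 c, c :: st.2)) (vis, stk)).2 := by
  intro cs
  induction cs with
  | nil => intro vis stk x h; exact h
  | cons c t ih =>
    intro vis stk x h
    simp only [List.foldl_cons]
    by_cases hc : c ∈ vis
    · simp only [hc, if_pos]; exact ih _ _ _ h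
    · simp only [hc, if_false]
      exact ih _ _ _ (List.mem_cons_of_mem _ h)

theorem pvExpand_new : ∀ (cs : List String) (vis : PySem.Set String) (stk : List String) (x : String),
    x ∈ (cs.foldl (fun (st : PySem.Set String × List String) c =>
        if c ∈ st.1 then st else (PySem.Set.add st.1 c, c :: st.2)) (vis, stk)).1 →
      x ∈ vis ∨ x ∈ (cs.foldl (fun (st : PySem.Set String × List String) c =>
        if c ∈ st.1 then st else (PySem.Set.add st.1 c, c :: st.2)) (vis, stk)).2 := by
  intro cs
  induction cs with
  | nil => intro vis stk x h; exact Or.inl h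
  | cons c t ih =>
    intro vis stk x
    simp only [List.foldl_cons]
    by_cases hc : c ∈ vis
    · simp only [hc, if_pos]; exact ih _ _ _
    · simp only [hc, if_false]
      intro h
      rcases ih _ _ _ h with h | h
      · rcases (PySem.Set.mem_add _ _ _).mp h with h | rfl
        · exact Or.inl h
        · exact Or.inr (pvExpand_stk_sub t _ _ _ List.mem_cons_self)
      · exact Or.inr h

theorem pvExpand_nodup : ∀ (cs : List String) (vis : PySem.Set String) (stk : List String),
    vis.Nodup →
    ((cs.foldl (fun (st : PySem.Set String × List String) c =>
        if c ∈ st.1 then st else (PySem.Set.add st.1 c, c :: st.2)) (vis, stk)).1).Nodup := by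
  intro cs
  induction cs with
  | nil => intro vis stk h; exact h
  | cons c t ih =>
    intro vis stk h
    simp only [List.foldl_cons]
    by_cases hc : c ∈ vis
    · simp only [hc, if_pos]; exact ih _ _ h
    · simp only [hc, if_false]
      exact ih _ _ (PySem.Set.nodup_add _ _ h)

theorem pvExpand_card (KF : Finset String) : ∀ (cs : List String) (vis : PySem.Set String) (stk : List String),
    (∀ c ∈ cs, c ∈ KF) →
    (KF.filter (fun z => z ∉ (cs.foldl (fun (st : PySem.Set String × List String) c =>
        if c ∈ st.1 then st else (PySem.Set.add st.1 c, c :: st.2)) (vis, stk)).1)).card +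
      ((cs.foldl (fun (st : PySem.Set String × List String) c =>
        if c ∈ st.1 then st else (PySem.Set.add st.1 c, c :: st.2)) (vis, stk)).2).length ≤
    (KF.filter (fun z => z ∉ vis)).card + stk.length := by
  intro cs
  induction cs with
  | nil => intro vis stk _; exact le_refl _
  | cons c t ih =>
    intro vis stk hcs
    simp only [List.foldl_cons]
    by_cases hc : c ∈ vis
    · simp only [hc, if_pos]
      exact ih _ _ (fun q hq => hcs q (List.mem_cons_of_mem _ hq))
    · simp only [hc, if_false]
      refine le_trans (ih _ _ (fun q hq => hcs q (List.mem_cons_of_mem _ hq))) ?_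
      have hfil : KF.filter (fun z => z ∉ PySem.Set.add vis c) =
          (KF.filter (fun z => z ∉ vis)).erase c := by
        ext z
        simp only [Finset.mem_filter, Finset.mem_erase, PySem.Set.mem_add]
        constructor
        · rintro ⟨hz, hnz⟩
          push_neg at hnz
          exact ⟨hnz.2, hz, hnz.1⟩
        · rintro ⟨hne, hz, hnv⟩
          refine ⟨hz, ?_⟩
          rintro (h | h)
          · exact hnv h
          · exact hne h
      have hcmem : c ∈ KF.filter (fun z => z ∉ vis) :=
        Finset.mem_filter.mpr ⟨hcs c List.mem_cons_self, hc⟩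
      have hpos : 0 < (KF.filter (fun z => z ∉ vis)).card := Finset.card_pos.mpr ⟨c, hcmem⟩
      rw [hfil, Finset.card_erase_of_mem hcmem]
      simp only [List.length_cons]
      omega

theorem pvDfsLoop_nodup (rev : PySem.Dict String (PySem.Set String)) :
    ∀ (fuel : Nat) (vis : PySem.Set String) (stk : List String), vis.Nodup →
      (pvDfsLoop rev fuel vis stk).Nodup := by
  intro fuel
  induction fuel with
  | zero => intro vis stk h; exact h
  | succ f ih =>
    intro vis stk h
    cases stk with
    | nil => exact h
    | cons n stk =>
      show (pvDfsLoop rev f _ _).Nodup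
      exact ih _ _ (pvExpand_nodup _ _ _ h)

theorem pvRtg_absorb (rev : PySem.Dict String (PySem.Set String))
    (vis' stk' : List String)
    (hInv : ∀ y ∈ vis', y ∈ stk' ∨ ∀ z, pvE rev y z → z ∈ vis') :
    ∀ c x, Relation.ReflTransGen (pvE rev) c x → c ∈ vis' →
      x ∈ vis' ∨ ∃ m ∈ stk', Relation.TransGen (pvE rev) m x := by
  intro c x hrtg
  induction hrtg using Relation.ReflTransGen.head_induction_on with
  | refl => intro h; exact Or.inl h
  | head h' hrest ihr =>
    rename_i a c'
    intro ha
    rcases hInv a ha with hstk | hexp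
    · exact Or.inr ⟨a, hstk, Relation.TransGen.head'_iff.mpr ⟨c', h', hrest⟩⟩
    · exact ihr (hexp c' h')

theorem pvDfsLoop_mem (rev : PySem.Dict String (PySem.Set String)) (KF : Finset String)
    (hK : ∀ x y, pvE rev x y → y ∈ KF) :
    ∀ (fuel : Nat) (vis : PySem.Set String) (stk : List String),
      (∀ y ∈ vis, y ∈ stk ∨ ∀ z, pvE rev y z → z ∈ vis) →
      (KF.filter (fun z => z ∉ vis)).card + stk.length ≤ fuel →
      ∀ x, x ∈ pvDfsLoop rev fuel vis stk ↔
        x ∈ vis ∨ ∃ n ∈ stk, Relation.TransGen (pvE rev) n x := by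
  intro fuel
  induction fuel with
  | zero =>
    intro vis stk hInv hm x
    have hstk : stk = [] := List.length_eq_zero_iff.mp (by omega)
    subst hstk
    simp [pvDfsLoop]
  | succ f ih =>
    intro vis stk hInv hm x
    cases stk with
    | nil => simp [pvDfsLoop]
    | cons n stk =>
      show x ∈ pvDfsLoop rev f _ _ ↔ _
      set r := (PySem.Dict.getD rev n PySem.Set.empty).foldl
        (fun (st : PySem.Set String × List String) c =>
          if c ∈ st.1 then st else (PySem.Set.add st.1 c, c :: st.2)) (vis, stk) with hr
      -- new invariant
      have hInv' : ∀ y ∈ r.1, y ∈ r.2 ∨ ∀ z, pvE rev y z → z ∈ r.1 := by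
        intro y hy
        rcases pvExpand_mem1 _ vis stk y |>.mp hy with hyv | hyc
        · rcases hInv y hyv with hys | hye
          · rcases List.mem_cons.mp hys with rfl | hys
            · exact Or.inr (fun z hz => (pvExpand_mem1 _ vis stk z).mpr (Or.inr hz))
            · exact Or.inl (pvExpand_stk_sub _ vis stk y hys)
          · exact Or.inr (fun z hz => (pvExpand_mem1 _ vis stk z).mpr (Or.inl (hye z hz)))
        · rcases pvExpand_new _ vis stk y hy with hyv | hy2
          · rcases hInv y hyv with hys | hye
            · rcases List.mem_cons.mp hys with rfl | hys
              · exact Or.inr (fun z hz => (pvExpand_mem1 _ vis stk z).mpr (Or.inr hz))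
              · exact Or.inl (pvExpand_stk_sub _ vis stk y hys)
            · exact Or.inr (fun z hz => (pvExpand_mem1 _ vis stk z).mpr (Or.inl (hye z hz)))
          · exact Or.inl hy2
      have hmeas : (KF.filter (fun z => z ∉ r.1)).card + r.2.length ≤ f := by
        have := pvExpand_card KF (PySem.Dict.getD rev n PySem.Set.empty) vis stk
          (fun c hc => hK n c hc)
        rw [← hr] at this
        simp only [List.length_cons] at hm
        omega
      have hIH := ih r.1 r.2 hInv' hmeas
      constructor
      · intro hx
        rcases (hIH x).mp hx with hx1 | ⟨m, hm2, htg⟩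
        · rcases pvExpand_mem1 _ vis stk x |>.mp hx1 with h | h
          · exact Or.inl h
          · exact Or.inr ⟨n, List.mem_cons_self, Relation.TransGen.single h⟩
        · rcases pvExpand_mem2 _ vis stk m hm2 with h | h
          · exact Or.inr ⟨m, List.mem_cons_of_mem _ h, htg⟩
          · exact Or.inr ⟨n, List.mem_cons_self, Relation.TransGen.head h htg⟩
      · intro hx
        rcases hx with hx | ⟨m, hm2, htg⟩
        · exact (hIH x).mpr (Or.inl ((pvExpand_mem1 _ vis stk x).mpr (Or.inl hx)))
        · rcases List.mem_cons.mp hm2 with rfl | hm2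
          · -- m = n : decompose the first step
            obtain ⟨c, hmc, hrtg⟩ := Relation.TransGen.head'_iff.mp htg
            have hcv : c ∈ r.1 := (pvExpand_mem1 _ vis stk c).mpr (Or.inr hmc)
            rcases pvRtg_absorb rev r.1 r.2 hInv' c x hrtg hcv with h | ⟨m', hm', htg'⟩
            · exact (hIH x).mpr (Or.inl h)
            · exact (hIH x).mpr (Or.inr ⟨m', hm', htg'⟩)
          · exact (hIH x).mpr (Or.inr ⟨m, pvExpand_stk_sub _ vis stk m hm2, htg⟩)


theorem pvRW_head (rev : PySem.Dict String (PySem.Set String)) :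
    ∀ (k : Nat) (s y x : String), pvE rev s y → pvRW rev k y x → pvRW rev (k + 1) s x := by
  intro k
  induction k with
  | zero => intro s y x _ h; exact absurd h (by simp [pvRW])
  | succ k ih =>
    intro s y x hsy h
    rcases h with h | ⟨m, hm, he⟩
    · exact Or.inr ⟨y, pvRW_le rev (Nat.one_le_iff_ne_zero.mpr (by omega)) s y
        (show pvRW rev 1 s y from Or.inl hsy), h⟩
    · exact Or.inr ⟨m, ih s y m hsy hm, he⟩

theorem pvTg_to_path (rev : PySem.Dict String (PySem.Set String)) (s x : String)
    (h : Relation.TransGen (pvE rev) s x) :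
    ∃ l, l ≠ [] ∧ List.IsChain (pvE rev) (s :: l) ∧ l.getLast? = some x := by
  induction h with
  | single h =>
    rename_i b
    exact ⟨[b], by simp, List.isChain_pair.mpr h, rfl⟩
  | tail hab hbc ih =>
    rename_i b c
    obtain ⟨l, hne, hch, hlast⟩ := ih
    refine ⟨l ++ [c], by simp, ?_, by simp [List.getLast?_append]⟩
    have e : s :: (l ++ [c]) = (s :: l) ++ [c] := rfl
    rw [e]
    refine hch.append (List.isChain_singleton c) ?_
    intro p hp q hq
    have hgl : (s :: l).getLast? = some b := by
      rw [show s :: l = [s] ++ l from rfl, List.getLast?_append, hlast]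
      rfl
    rw [hgl] at hp
    simp only [Option.mem_def, Option.some.injEq] at hp
    simp only [List.head?_cons, Option.mem_def, Option.some.injEq] at hq
    subst hp; subst hq
    exact hbc

theorem pvPath_elems (rev : PySem.Dict String (PySem.Set String)) (KF : Finset String)
    (hK : ∀ x y, pvE rev x y → y ∈ KF) :
    ∀ (l : List String) (s : String), List.IsChain (pvE rev) (s :: l) → ∀ y ∈ l, y ∈ KF := by
  intro l
  induction l with
  | nil => intro s _ y hy; exact absurd hy (List.not_mem_nil)
  | cons c t ih =>
    intro s hch y hy
    obtain ⟨hhead, htail⟩ := List.isChain_cons.mp hch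
    have hsc : pvE rev s c := hhead c (by simp)
    rcases List.mem_cons.mp hy with rfl | hy
    · exact hK s y hsc
    · exact ih c htail y hy

theorem pvPath_to_rw (rev : PySem.Dict String (PySem.Set String)) :
    ∀ (l : List String) (s x : String), l ≠ [] →
      List.IsChain (pvE rev) (s :: l) → l.getLast? = some x → pvRW rev l.length s x := by
  intro l
  induction l with
  | nil => intro s x h; exact absurd rfl h
  | cons c t ih =>
    intro s x _ hch hlast
    obtain ⟨hhead, htail⟩ := List.isChain_cons.mp hch
    have hsc : pvE rev s c := hhead c (by simp)
    cases t with
    | nil =>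
      simp only [List.getLast?_singleton, Option.some.injEq] at hlast
      subst hlast
      exact Or.inl hsc
    | cons d t' =>
      have hlast' : (d :: t').getLast? = some x := by
        rwa [List.getLast?_cons_cons] at hlast
      have hrw := ih c x (by simp) htail hlast'
      exact pvRW_head rev _ s c x hsc hrw

theorem pvShorten (rev : PySem.Dict String (PySem.Set String)) (KF : Finset String)
    (hK : ∀ x y, pvE rev x y → y ∈ KF) :
    ∀ (n : Nat) (l : List String) (s x : String), l.length ≤ n → l ≠ [] →
      List.IsChain (pvE rev) (s :: l) → l.getLast? = some x →
      ∃ l', l' ≠ [] ∧ l'.length ≤ KF.card ∧ List.IsChain (pvE rev) (s :: l') ∧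
        l'.getLast? = some x := by
  intro n
  induction n with
  | zero =>
    intro l s x hlen hne _ _
    exact absurd (List.length_eq_zero_iff.mp (by omega)) hne
  | succ n ih =>
    intro l s x hlen hne hch hlast
    by_cases hsmall : l.length ≤ KF.card
    · exact ⟨l, hne, hsmall, hch, hlast⟩
    · have hsub : ∀ y ∈ l, y ∈ KF := pvPath_elems rev KF hK l s hch
      have hnodup : ¬ l.Nodup := by
        intro hnd
        have h1 : l.toFinset.card = l.length := List.toFinset_card_of_nodup hnd
        have h2 : l.toFinset ⊆ KF := fun y hy => hsub y (List.mem_toFinset.mp hy)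
        have := Finset.card_le_card h2
        omega
      obtain ⟨a, hdup⟩ := List.exists_duplicate_iff_not_nodup.mpr hnodup
      have hsl : List.Sublist [a, a] l := List.duplicate_iff_sublist.mp hdup
      obtain ⟨r₁, r₂, hl, ha1, hsl2⟩ := List.cons_sublist_iff.mp hsl
      have ha2 : a ∈ r₂ := List.singleton_sublist.mp hsl2
      obtain ⟨p, q, hr1⟩ := List.append_of_mem ha1
      obtain ⟨u, v, hr2⟩ := List.append_of_mem ha2
      have e1 : s :: l = ((s :: p) ++ [a]) ++ ((q ++ u) ++ ([a] ++ v)) := by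
        simp [hl, hr1, hr2]
      have e2 : s :: l = (((s :: p) ++ [a]) ++ (q ++ u)) ++ ([a] ++ v) := by
        simp [hl, hr1, hr2]
      have h1 : List.IsChain (pvE rev) ((s :: p) ++ [a]) := (e1 ▸ hch).left_of_append
      have h2 : List.IsChain (pvE rev) ([a] ++ v) := (e2 ▸ hch).right_of_append
      have hcomb : List.IsChain (pvE rev) ((s :: p) ++ ([a] ++ v)) := by
        have := h1.append_overlap h2 (by simp)
        simpa using this
      have hch' : List.IsChain (pvE rev) (s :: (p ++ a :: v)) := by
        simpa using hcomb
      have hlen' : (p ++ a :: v).length ≤ n := by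
        have : l.length = p.length + q.length + u.length + v.length + 2 := by
          simp [hl, hr1, hr2]; omega
        simp only [List.length_append, List.length_cons]
        omega
      have hlast' : (p ++ a :: v).getLast? = some x := by
        cases v with
        | nil =>
          have e : l = (p ++ a :: q ++ u) ++ [a] := by simp [hl, hr1, hr2]
          rw [e, List.getLast?_append] at hlast
          simp only [List.getLast?_singleton, Option.some_or, Option.some.injEq] at hlast
          subst hlast
          rw [List.getLast?_append]
          simp
        | cons w v' =>
          obtain ⟨xv, hxv⟩ := Option.isSome_iff_exists.mp
            (show ((w :: v').getLast?).isSome from List.getLast?_isSome.mpr (by simp))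
          have e : l = (p ++ a :: q ++ u ++ [a]) ++ (w :: v') := by simp [hl, hr1, hr2]
          rw [e, List.getLast?_append, hxv] at hlast
          simp only [Option.some_or, Option.some.injEq] at hlast
          subst hlast
          have e2 : p ++ a :: w :: v' = (p ++ [a]) ++ (w :: v') := by simp
          rw [e2, List.getLast?_append, hxv]
          exact Option.some_or
      exact ih (p ++ a :: v) s x hlen' (by simp) hch' hlast'

theorem pvTg_to_rw (rev : PySem.Dict String (PySem.Set String)) (KF : Finset String)
    (hK : ∀ x y, pvE rev x y → y ∈ KF) (s x : String)
    (h : Relation.TransGen (pvE rev) s x) : pvRW rev KF.card s x := by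
  obtain ⟨l, hne, hch, hlast⟩ := pvTg_to_path rev s x h
  obtain ⟨l', hne', hlen', hch', hlast'⟩ :=
    pvShorten rev KF hK l.length l s x (le_refl _) hne hch hlast
  exact pvRW_le rev hlen' s x (pvPath_to_rw rev l' s x hne' hch' hlast')


-- both per-source visited sets have the same members (the strict reverse-reachability
-- relation), are duplicate-free, hence have the same size
theorem pv_len_eq (dep : List (String × List String)) (s : String) :
    PySem.Set.len (pvDfsLoop (pvBuildRev dep) (dep.length + 1) PySem.Set.empty [s]) =
    PySem.Set.len (pvSatLoop (pvBuildRev dep) dep.length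
      (PySem.Set.ofList (PySem.Dict.getD (pvBuildRev dep) s PySem.Set.empty))) := by
  set rev := pvBuildRev dep with hrev
  set KF : Finset String := (dep.map Prod.fst).toFinset with hKF
  have hK : ∀ x y, pvE rev x y → y ∈ KF := fun x y h =>
    List.mem_toFinset.mpr (pvBuildRev_target dep x y h)
  have hKcard : KF.card ≤ dep.length := by
    have := List.toFinset_card_le (dep.map Prod.fst)
    simpa using this
  have hA : ∀ x, x ∈ pvDfsLoop rev (dep.length + 1) PySem.Set.empty [s] ↔
      Relation.TransGen (pvE rev) s x := by
    intro x
    have hcard : (KF.filter (fun z => z ∉ (PySem.Set.empty : PySem.Set String))).card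
        + [s].length ≤ dep.length + 1 := by
      have h1 := Finset.card_filter_le KF (fun z => z ∉ (PySem.Set.empty : PySem.Set String))
      simp only [List.length_singleton]
      omega
    have hmem := pvDfsLoop_mem rev KF hK (dep.length + 1) PySem.Set.empty [s]
      (by intro y hy; exact absurd hy (List.not_mem_nil)) hcard x
    rw [hmem]
    simp
  have hB : ∀ x, x ∈ pvSatLoop rev dep.length
      (PySem.Set.ofList (PySem.Dict.getD rev s PySem.Set.empty)) ↔
      Relation.TransGen (pvE rev) s x := by
    intro x
    have hvis0 : ∀ x, x ∈ PySem.Set.ofList (PySem.Dict.getD rev s PySem.Set.empty) ↔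
        pvRW rev 1 s x := by
      intro x
      rw [PySem.Set.mem_ofList]
      constructor
      · intro h; exact Or.inl h
      · rintro (h | ⟨m, hm, _⟩)
        · exact h
        · exact absurd hm (by simp [pvRW])
    rw [pvSatLoop_mem rev s dep.length 1 _ (le_refl 1) hvis0 x]
    constructor
    · exact pvRW_to_tg rev _ s x
    · intro h
      exact pvRW_le rev (by omega) s x (pvTg_to_rw rev KF hK s x h)
  have hnA : (pvDfsLoop rev (dep.length + 1) PySem.Set.empty [s]).Nodup :=
    pvDfsLoop_nodup rev _ _ _ List.nodup_nil
  have hnB : (pvSatLoop rev dep.length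
      (PySem.Set.ofList (PySem.Dict.getD rev s PySem.Set.empty))).Nodup :=
    pvSatLoop_nodup rev _ _ (PySem.Set.nodup_ofList _)
  have hperm := (List.perm_ext_iff_of_nodup hnA hnB).mpr
    (fun a => (hA a).trans (hB a).symm)
  show ((pvDfsLoop rev (dep.length + 1) PySem.Set.empty [s]).length : Int) = _
  exact_mod_cast congrArg Int.ofNat hperm.length_eq

-- ===== VERDICT (by name: the statement is the Claim_ definition above) =====
theorem compute_downstream_spec : Claim_equal_compute_downstream := by
  intro assignments dep _
  unfold Spec_compute_downstream compute_downstream compute_downstream_alt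
  have hcongr : ∀ (l : List String) (d : PySem.Dict String Int) (f g : String → Int),
      (∀ s, f s = g s) →
      l.foldl (fun r s => PySem.Dict.insert r s (f s)) d =
      l.foldl (fun r s => PySem.Dict.insert r s (g s)) d := by
    intro l
    induction l with
    | nil => intro d f g _; rfl
    | cons a t ih => intro d f g hfg; simp only [List.foldl_cons, hfg a]; exact ih _ _ _ hfg
  exact congrArg PySem.Dict.items
    (hcongr assignments PySem.Dict.empty _ _ (fun s => pv_len_eq dep s))
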